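-- pv_equiv track=rewrite | github.com/cdelbs/coursework | software_engineering/Fish/Other/coords.py | board_from_teacher
-- ===== SOURCE A (Python) =====
-- from typing import List, Sequence, Tuple
--
-- def from_dh(col_dh: int, row2_dh: int) -> Tuple[int, int]:
--     """Doubled-height (col_dh, row2_dh) → engine (row, col)."""
--     col = col_dh
--     row = (row2_dh - (col_dh & 1)) // 2
--     return row, col
--
-- def band_start_col(row2_dh: int) -> int:
--     """First valid DH column in this band. Equals row2_dh % 2."""
--     return row2_dh & 1
--
-- def board_from_teacher(teacher_rows: Sequence[Sequence[int]]) -> List[List[int]]: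
--     """
--     Convert ragged teacher rows (one band per row2_dh) to a rectangular
--     engine fish grid. Every teacher cell maps to exactly one engine cell.
--     """
--     cells: List[Tuple[int, int, int]] = []
--     max_row = -1
--     max_col = -1
--     for row2_dh, band in enumerate(teacher_rows):
--         start = band_start_col(row2_dh)
--         for idx, fish in enumerate(band):
--             col_dh = start + 2 * idx
--             r, c = from_dh(col_dh, row2_dh)
--             cells.append((r, c, fish))
--             if r > max_row:
--                 max_row = r
--             if c > max_col:
--                 max_col = c
--     rows = max_row + 1 if max_row >= 0 else 0
--     cols = max_col + 1 if max_col >= 0 else 0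
--     grid = [[0] * cols for _ in range(rows)]
--     for r, c, fish in cells:
--         grid[r][c] = fish
--     return grid
-- ===== SOURCE B (Python) =====
-- from typing import List, Sequence
--
-- def board_from_teacher(teacher_rows: Sequence[Sequence[int]]) -> List[List[int]]:
--     # Dimensions: each nonempty band at row2_dh occupies engine row row2_dh//2
--     # and its rightmost cell sits in column row2_dh%2 + 2*(len(band)-1).
--     rows = max((i // 2 for i, b in enumerate(teacher_rows) if b), default=-1) + 1
--     cols = max((i % 2 + 2 * (len(b) - 1) for i, b in enumerate(teacher_rows) if b), default=-1) + 1
--     # Output-driven: engine cell (r, c) is fed by teacher cell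
--     # (band 2*r + c%2, index c//2); anything unfed is 0. The DH map is a
--     # bijection, so reading each cell's unique source equals A's writes.
--     def fish_at(r: int, c: int) -> int:
--         i = 2 * r + c % 2
--         j = c // 2
--         if i < len(teacher_rows) and j < len(teacher_rows[i]):
--             return teacher_rows[i][j]
--         return 0
--     return [[fish_at(r, c) for c in range(cols)] for r in range(rows)]
-- ===== Notes on version B (the rewrite author's own statement) =====
-- stated objective: alternative
-- what changed: B inverts the data flow: instead of A's collect-cells / allocate / mutate-in-place fill, B computes the dimensions with two max() comprehensions over the nonempty bands and then builds the grid read-driven, each engine cell (r, c) reading its unique teacher source teacher_rows[2*r + c%2][c//2] (0 if absent), which is exact because the doubled-height map is a bijection.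
import Mathlib
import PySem

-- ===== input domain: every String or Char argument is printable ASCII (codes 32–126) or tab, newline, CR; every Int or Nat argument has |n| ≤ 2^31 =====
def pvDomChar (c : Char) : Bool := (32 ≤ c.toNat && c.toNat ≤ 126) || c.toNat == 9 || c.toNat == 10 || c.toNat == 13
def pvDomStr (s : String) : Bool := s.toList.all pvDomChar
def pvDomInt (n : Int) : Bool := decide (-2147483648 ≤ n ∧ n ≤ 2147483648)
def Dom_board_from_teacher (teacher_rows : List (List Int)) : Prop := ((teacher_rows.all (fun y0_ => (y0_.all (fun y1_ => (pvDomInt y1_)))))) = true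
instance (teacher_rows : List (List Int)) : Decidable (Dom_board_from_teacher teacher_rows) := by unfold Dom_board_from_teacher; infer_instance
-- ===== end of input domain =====

-- B replaces A's write-driven fill (collect cells, allocate, assign) by a read-driven
-- construction: dimensions via two max() comprehensions over the nonempty bands, then each
-- engine cell (r, c) reads its unique teacher source (band 2r + c%2, index c//2), 0 if absent
-- (objective: alternative — output-driven table build instead of input-driven mutation).

-- ===== PORT A =====
-- `grid[r][c] = fish` on a nested list; in A r and c are always nonnegative and in range,
-- so the .toNat / List.set semantics coincide with Python's assignment.
def pySetCell (g : List (List Int)) (r c fish : Int) : List (List Int) :=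
  g.set r.toNat ((g.getD r.toNat []).set c.toNat fish)

def from_dh (col_dh row2_dh : Int) : Int × Int :=
  let col := col_dh
  let row := PySem.Int.floordiv (row2_dh - PySem.Int.band col_dh 1) 2
  (row, col)

def band_start_col (row2_dh : Int) : Int := PySem.Int.band row2_dh 1

-- state of A's first loop: (cells, max_row, max_col)
def aInner (row2_dh : Int) (st : List (Int × Int × Int) × Int × Int) (q : Int × Int) :
    List (Int × Int × Int) × Int × Int :=
  let col_dh := band_start_col row2_dh + 2 * q.1
  let rc := from_dh col_dh row2_dh
  ( st.1 ++ [(rc.1, rc.2, q.2)]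
  , if rc.1 > st.2.1 then rc.1 else st.2.1
  , if rc.2 > st.2.2 then rc.2 else st.2.2 )

def aOuter (st : List (Int × Int × Int) × Int × Int) (p : Int × List Int) :
    List (Int × Int × Int) × Int × Int :=
  (PySem.List.enumerate p.2 0).foldl (aInner p.1) st

def board_from_teacher (teacher_rows : List (List Int)) : List (List Int) :=
  let st := (PySem.List.enumerate teacher_rows 0).foldl aOuter ([], -1, -1)
  let rows : Int := if st.2.1 ≥ 0 then st.2.1 + 1 else 0
  let cols : Int := if st.2.2 ≥ 0 then st.2.2 + 1 else 0
  let grid := List.replicate rows.toNat (List.replicate cols.toNat (0 : Int))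
  st.1.foldl (fun g c => pySetCell g c.1 c.2.1 c.2.2) grid

-- ===== PORT B =====
-- 'i < len(teacher_rows) and j < len(teacher_rows[i])' guard, then indexing; the two
-- nested ifs are Python's short-circuit 'and'.
def fishAt (teacher_rows : List (List Int)) (r c : Int) : Int :=
  let i := 2 * r + PySem.Int.mod c 2
  let j := PySem.Int.floordiv c 2
  if i < (teacher_rows.length : Int) then
    let band := PySem.List.pyGetD teacher_rows i []
    if j < (band.length : Int) then PySem.List.pyGetD band j 0 else 0
  else 0

def board_from_teacher_alt (teacher_rows : List (List Int)) : List (List Int) :=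
  let rows :=
    PySem.List.maxD
      (((PySem.List.enumerate teacher_rows 0).filter (fun p => !p.2.isEmpty)).map
        (fun p => PySem.Int.floordiv p.1 2)) (fun x => x) (-1) + 1
  let cols :=
    PySem.List.maxD
      (((PySem.List.enumerate teacher_rows 0).filter (fun p => !p.2.isEmpty)).map
        (fun p => PySem.Int.mod p.1 2 + 2 * ((p.2.length : Int) - 1))) (fun x => x) (-1) + 1
  (PySem.List.pyRange 0 rows 1).map (fun r =>
    (PySem.List.pyRange 0 cols 1).map (fun c => fishAt teacher_rows r c))

-- ===== PRECONDITION & SPEC =====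
def Spec_board_from_teacher (teacher_rows : List (List Int)) (out : List (List Int)) : Prop := out = board_from_teacher_alt teacher_rows
instance (teacher_rows : List (List Int)) (out : List (List Int)) : Decidable (Spec_board_from_teacher teacher_rows out) := by unfold Spec_board_from_teacher; infer_instance

-- ===== CLAIM (what is proved, stated in full; the proofs are below) =====
def Claim_equal_board_from_teacher : Prop := ∀ (teacher_rows : List (List Int)), Dom_board_from_teacher teacher_rows → Spec_board_from_teacher teacher_rows (board_from_teacher teacher_rows)

-- ===== LEMMAS AND PROOFS =====

-- the cell A appends for index q.1 of band row2_dh = i, in closed form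
def cellF (i : Int) (q : Int × Int) : Int × Int × Int :=
  (PySem.Int.floordiv i 2, PySem.Int.mod i 2 + 2 * q.1, q.2)

def cellsFlat (tr : List (List Int)) (s : Int) : List (Int × Int × Int) :=
  (PySem.List.enumerate tr s).flatMap (fun p => (PySem.List.enumerate p.2 0).map (cellF p.1))

-- per-band dimension step (proof-side characterisation of A's max tracking)
def dStep (m : Int × Int) (p : Int × List Int) : Int × Int :=
  if p.2.isEmpty then m
  else ( max m.1 (PySem.Int.floordiv p.1 2)
       , max m.2 (PySem.Int.mod p.1 2 + 2 * ((p.2.length : Int) - 1)) )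

lemma if_gt_eq_max (a b : Int) : (if b > a then b else a) = max a b := by
  by_cases h : a < b
  · rw [if_pos h, max_eq_right h.le]
  · rw [if_neg h, max_eq_left (by omega)]

lemma aInner_eq (i : Int) (st : List (Int × Int × Int) × Int × Int) (q : Int × Int) :
    aInner i st q =
      ( st.1 ++ [cellF i q]
      , max st.2.1 (PySem.Int.floordiv i 2)
      , max st.2.2 (PySem.Int.mod i 2 + 2 * q.1) ) := by
  have hcol : PySem.Int.mod (PySem.Int.mod i 2 + 2 * q.1) 2 = PySem.Int.mod i 2 := by
    rw [PySem.Int.mod_eq_emod_of_pos (by omega), PySem.Int.mod_eq_emod_of_pos (by omega)]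
    omega
  have hrow : PySem.Int.floordiv (i - PySem.Int.mod i 2) 2 = PySem.Int.floordiv i 2 := by
    rw [PySem.Int.floordiv_eq_ediv_of_pos (by omega), PySem.Int.floordiv_eq_ediv_of_pos (by omega),
        PySem.Int.mod_eq_emod_of_pos (by omega)]
    omega
  simp only [aInner, from_dh, cellF, if_gt_eq_max, band_start_col, PySem.Int.band_one]
  rw [hcol, hrow]

lemma inner_fold_eq (i : Int) (band : List Int) :
    ∀ (j : Int) (cs : List (Int × Int × Int)) (mr mc : Int),
    (PySem.List.enumerate band j).foldl (aInner i) (cs, mr, mc)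
      = ( cs ++ (PySem.List.enumerate band j).map (cellF i)
        , if band.isEmpty then mr else max mr (PySem.Int.floordiv i 2)
        , if band.isEmpty then mc
          else max mc (PySem.Int.mod i 2 + 2 * (j + (band.length : Int) - 1)) ) := by
  induction band with
  | nil => intro j cs mr mc; simp [PySem.List.enumerate_nil]
  | cons f rest ih =>
    intro j cs mr mc
    rw [PySem.List.enumerate_cons]
    simp only [List.foldl_cons, List.map_cons, aInner_eq]
    rw [ih]
    cases rest with
    | nil =>
      simp only [PySem.List.enumerate_nil, List.map_nil, List.append_nil, List.isEmpty_nil,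
        List.isEmpty_cons, if_true, Bool.false_eq_true, if_false, List.length_cons,
        List.length_nil, Prod.mk.injEq]
      refine ⟨trivial, trivial, ?_⟩
      congr 1
      push_cast
      ring
    | cons g rest' =>
      simp only [List.isEmpty_cons, Bool.false_eq_true, if_false, List.append_assoc,
        List.singleton_append, List.length_cons, Prod.mk.injEq]
      refine ⟨trivial, ?_, ?_⟩
      · rw [max_assoc]
        congr 1
        exact max_self _
      · rw [max_assoc]
        congr 1
        rw [max_eq_right (by push_cast; omega)]
        push_cast
        ring

lemma outer_fold_eq (tr : List (List Int)) :
    ∀ (s : Int) (cs : List (Int × Int × Int)) (mr mc : Int),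
    (PySem.List.enumerate tr s).foldl aOuter (cs, mr, mc)
      = ( cs ++ cellsFlat tr s
        , ((PySem.List.enumerate tr s).foldl dStep (mr, mc)).1
        , ((PySem.List.enumerate tr s).foldl dStep (mr, mc)).2 ) := by
  induction tr with
  | nil => intro s cs mr mc; simp [PySem.List.enumerate_nil, cellsFlat]
  | cons band rest ih =>
    intro s cs mr mc
    rw [PySem.List.enumerate_cons]
    simp only [List.foldl_cons]
    rw [show aOuter (cs, mr, mc) (s, band)
          = (PySem.List.enumerate band 0).foldl (aInner s) (cs, mr, mc) from rfl,
        inner_fold_eq]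
    rw [ih]
    have hb : dStep (mr, mc) (s, band)
        = ( if band.isEmpty then mr else max mr (PySem.Int.floordiv s 2)
          , if band.isEmpty then mc
            else max mc (PySem.Int.mod s 2 + 2 * ((0 : Int) + (band.length : Int) - 1)) ) := by
      cases band with
      | nil => simp [dStep]
      | cons f r =>
        simp only [dStep, List.isEmpty_cons, Bool.false_eq_true, if_false, Prod.mk.injEq]
        refine ⟨trivial, ?_⟩
        congr 1
        ring
    rw [hb]
    simp [cellsFlat, PySem.List.enumerate_cons, List.append_assoc]

lemma dStep_fold_ge (l : List (Int × List Int)) :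
    ∀ (m : Int × Int), m.1 ≤ (l.foldl dStep m).1 ∧ m.2 ≤ (l.foldl dStep m).2 := by
  induction l with
  | nil => intro m; simp
  | cons p rest ih =>
    intro m
    simp only [List.foldl_cons]
    refine ⟨le_trans ?_ (ih (dStep m p)).1, le_trans ?_ (ih (dStep m p)).2⟩ <;>
      · unfold dStep; split <;> simp

-- ----- the dims fold is the pair of running maxima over the nonempty bands -----
lemma dims_fold_eq (l : List (Int × List Int)) (m : Int × Int) :
    l.foldl dStep m
      = ( (l.filter (fun p => !p.2.isEmpty)).foldl
            (fun a p => max a (PySem.Int.floordiv p.1 2)) m.1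
        , (l.filter (fun p => !p.2.isEmpty)).foldl
            (fun a p => max a (PySem.Int.mod p.1 2 + 2 * ((p.2.length : Int) - 1))) m.2 ) := by
  induction l generalizing m with
  | nil => simp
  | cons p rest ih =>
    simp only [List.foldl_cons, List.filter_cons]
    cases hp : p.2.isEmpty with
    | true => simp only [dStep, hp, if_true, Bool.not_true, Bool.false_eq_true, if_false]; exact ih m
    | false =>
      simp only [dStep, hp, Bool.false_eq_true, if_false, Bool.not_false, if_true, List.foldl_cons]
      exact ih _

-- maxD with identity key and a lower-bound default is the running-max fold
lemma maxD_id_eq_foldl (l : List Int) (d : Int) (h : ∀ x ∈ l, d ≤ x) :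
    PySem.List.maxD l (fun x => x) d = l.foldl max d := by
  cases l with
  | nil => simp [PySem.List.maxD, PySem.List.max?]
  | cons x t =>
    rw [PySem.List.maxD, PySem.List.max?_id_cons]
    simp only [Option.getD_some, List.foldl_cons]
    rw [max_eq_right (h x (by simp))]

-- ----- pointwise description of A's fill loop -----
def getc (g : List (List Int)) (r c : Nat) : Int := (g.getD r []).getD c 0

-- last write to (r, c) among a cell list
def wstep (r c : Nat) (acc : Option Int) (t : Int × Int × Int) : Option Int :=
  if t.1.toNat = r ∧ t.2.1.toNat = c then some t.2.2 else acc

lemma shape_set (g : List (List Int)) (a b f : Int) :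
    (pySetCell g a b f).length = g.length ∧
    ∀ k, ((pySetCell g a b f).getD k []).length = (g.getD k []).length := by
  refine ⟨List.length_set, ?_⟩
  intro k
  simp only [pySetCell, List.getD_eq_getElem?_getD, List.getElem?_set]
  split_ifs with h1 h2
  · subst h1
    rw [List.getElem?_eq_getElem h2]
    simp
  · rw [List.getElem?_eq_none (by omega)]
  · rfl

lemma getc_set (g : List (List Int)) (a b f : Int) (r c : Nat)
    (ha : a.toNat < g.length) (hb : b.toNat < (g.getD a.toNat []).length) :
    getc (pySetCell g a b f) r c = (wstep r c none (a, b, f)).getD (getc g r c) := by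
  by_cases h1 : a.toNat = r
  · subst h1
    have hrow : (pySetCell g a b f).getD a.toNat [] = (g.getD a.toNat []).set b.toNat f := by
      simp [pySetCell, List.getD_eq_getElem?_getD, List.getElem?_set, ha]
    by_cases h2 : b.toNat = c
    · subst h2
      simp only [getc, hrow, wstep, and_self, if_true, List.getD_eq_getElem?_getD,
        List.getElem?_set]
      have hb' : b.toNat < (g[a.toNat]?.getD []).length := by
        simpa [List.getD_eq_getElem?_getD] using hb
      simp [hb']
    · simp only [getc, hrow, wstep, List.getD_eq_getElem?_getD, List.getElem?_set,
        if_neg h2]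
      rw [if_neg (by tauto), Option.getD_none]
  · have hrow : (pySetCell g a b f).getD r [] = g.getD r [] := by
      simp [pySetCell, List.getD_eq_getElem?_getD, List.getElem?_set, h1]
    simp only [getc, hrow, wstep, if_neg (by tauto : ¬(a.toNat = r ∧ b.toNat = c)),
      Option.getD_none]

lemma wstep_absorb (r c : Nat) :
    ∀ (cs : List (Int × Int × Int)) (i : Option Int),
    cs.foldl (wstep r c) i = (cs.foldl (wstep r c) none).or i := by
  intro cs
  induction cs with
  | nil => intro i; simp
  | cons t rest ih =>
    intro i
    simp only [List.foldl_cons]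
    by_cases hm : t.1.toNat = r ∧ t.2.1.toNat = c
    · rw [show wstep r c i t = some t.2.2 from by simp [wstep, hm],
          show wstep r c none t = some t.2.2 from by simp [wstep, hm],
          ih (some t.2.2), Option.or_assoc]
      rfl
    · rw [show wstep r c i t = i from by simp [wstep, hm],
          show wstep r c none t = none from by simp [wstep, hm]]
      exact ih i

lemma or_getD {x y : Option Int} {d : Int} : (x.or y).getD d = x.getD (y.getD d) := by
  cases x <;> rfl

lemma fold_writes (r c : Nat) :
    ∀ (cs : List (Int × Int × Int)) (g : List (List Int)),
    r < g.length → c < (g.getD r []).length →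
    (∀ t ∈ cs, t.1.toNat < g.length ∧ t.2.1.toNat < (g.getD t.1.toNat []).length) →
    getc (cs.foldl (fun g t => pySetCell g t.1 t.2.1 t.2.2) g) r c
      = (cs.foldl (wstep r c) none).getD (getc g r c) := by
  intro cs
  induction cs with
  | nil => intro g _ _ _; simp
  | cons t rest ih =>
    intro g hr hc hb
    have hsh := shape_set g t.1 t.2.1 t.2.2
    have ht := hb t (by simp)
    simp only [List.foldl_cons]
    rw [ih (pySetCell g t.1 t.2.1 t.2.2) (by rw [hsh.1]; exact hr) (by rw [hsh.2]; exact hc)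
          (fun u hu => by rw [hsh.1, hsh.2]; exact hb u (by simp [hu])),
        getc_set g t.1 t.2.1 t.2.2 r c ht.1 ht.2,
        wstep_absorb r c rest (wstep r c none t), or_getD]

-- ----- closed form of the last write of one band / of all bands -----
lemma band_writes_aux (q m : Int) (hq : 0 ≤ q) (hm0 : 0 ≤ m) (r c : Nat) :
    ∀ (band : List Int) (j : Int), 0 ≤ j →
    ((PySem.List.enumerate band j).map
        (fun p => ((q, m + 2 * p.1, p.2) : Int × Int × Int))).foldl (wstep r c) none
      = (if q = (r : Int) ∧ 0 ≤ (c : Int) - m - 2 * j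
            ∧ ((c : Int) - m - 2 * j) % 2 = 0
            ∧ (((c : Int) - m - 2 * j) / 2).toNat < band.length
         then some (band.getD (((c : Int) - m - 2 * j) / 2).toNat 0)
         else none) := by
  intro band
  induction band with
  | nil =>
    intro j hj
    simp [PySem.List.enumerate_nil]
  | cons f rest ih =>
    intro j hj
    rw [PySem.List.enumerate_cons]
    simp only [List.map_cons, List.foldl_cons]
    rw [wstep_absorb, ih (j + 1) (by omega)]
    by_cases hA : q = (r : Int)
    · by_cases ht0 : m + 2 * j = (c : Int)
      · rw [show wstep r c none (q, m + 2 * j, f) = some f from by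
              simp only [wstep]; rw [if_pos (by constructor <;> omega)],
            if_neg (by omega), if_pos ⟨hA, by omega, by omega,
              by simp only [List.length_cons]; omega⟩]
        have h0 : (((c : Int) - m - 2 * j) / 2).toNat = 0 := by omega
        simp [h0]
      · rw [show wstep r c none (q, m + 2 * j, f) = none from by
              simp only [wstep]; rw [if_neg (by omega)],
            Option.or_none]
        by_cases hP : 0 ≤ (c : Int) - m - 2 * (j + 1) ∧ ((c : Int) - m - 2 * (j + 1)) % 2 = 0
            ∧ (((c : Int) - m - 2 * (j + 1)) / 2).toNat < rest.length
        · rw [if_pos ⟨hA, hP⟩, if_pos ⟨hA, by omega, by omega,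
              by simp only [List.length_cons]; omega⟩]
          have hk : (((c : Int) - m - 2 * j) / 2).toNat
              = (((c : Int) - m - 2 * (j + 1)) / 2).toNat + 1 := by omega
          rw [hk, List.getD_cons_succ]
        · rw [if_neg (by tauto), if_neg (by
            rintro ⟨-, h1, h2, h3⟩
            simp only [List.length_cons] at h3
            exact hP ⟨by omega, by omega, by omega⟩)]
    · rw [show wstep r c none (q, m + 2 * j, f) = none from by
            simp only [wstep]; rw [if_neg (by omega)],
          Option.or_none, if_neg (by tauto), if_neg (by tauto)]

lemma band_writes (s : Int) (hs : 0 ≤ s) (r c : Nat) (band : List Int) (j : Int) (hj : 0 ≤ j) :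
    ((PySem.List.enumerate band j).map (cellF s)).foldl (wstep r c) none
      = (if PySem.Int.floordiv s 2 = (r : Int) ∧ 0 ≤ (c : Int) - PySem.Int.mod s 2 - 2 * j
            ∧ ((c : Int) - PySem.Int.mod s 2 - 2 * j) % 2 = 0
            ∧ (((c : Int) - PySem.Int.mod s 2 - 2 * j) / 2).toNat < band.length
         then some (band.getD (((c : Int) - PySem.Int.mod s 2 - 2 * j) / 2).toNat 0)
         else none) := by
  have hcf : cellF s = fun p : Int × Int =>
      ((PySem.Int.floordiv s 2, PySem.Int.mod s 2 + 2 * p.1, p.2) : Int × Int × Int) := by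
    funext p; rfl
  rw [hcf]
  exact band_writes_aux (PySem.Int.floordiv s 2) (PySem.Int.mod s 2)
    (by rw [PySem.Int.floordiv_eq_ediv_of_pos (by omega)]; omega)
    (PySem.Int.mod_nonneg s (by omega)) r c band j hj

lemma cells_writes (r c : Nat) :
    ∀ (tr : List (List Int)) (s : Int), 0 ≤ s →
    (cellsFlat tr s).foldl (wstep r c) none
      = (if 0 ≤ 2 * (r : Int) + (c : Int) % 2 - s
            ∧ (2 * (r : Int) + (c : Int) % 2 - s).toNat < tr.length
            ∧ c / 2 < (tr.getD (2 * (r : Int) + (c : Int) % 2 - s).toNat []).length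
         then some ((tr.getD (2 * (r : Int) + (c : Int) % 2 - s).toNat []).getD (c / 2) 0)
         else none) := by
  intro tr
  induction tr with
  | nil =>
    intro s hs
    simp [cellsFlat, PySem.List.enumerate_nil]
  | cons band rest ih =>
    intro s hs
    have hsplit : cellsFlat (band :: rest) s
        = (PySem.List.enumerate band 0).map (cellF s) ++ cellsFlat rest (s + 1) := by
      simp [cellsFlat, PySem.List.enumerate_cons]
    rw [hsplit, List.foldl_append, wstep_absorb, ih (s + 1) (by omega),
        band_writes s hs r c band 0 (by omega)]
    have hfd := PySem.Int.floordiv_mul_add_mod s 2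
    have hmn := PySem.Int.mod_nonneg s (by omega : (0:Int) < 2)
    have hml := PySem.Int.mod_lt s (by omega : (0:Int) < 2)
    by_cases hI : s = 2 * (r : Int) + (c : Int) % 2
    · rw [if_neg (by omega), Option.none_or]
      have htop0 : (2 * (r : Int) + (c : Int) % 2 - s).toNat = 0 := by omega
      have hidx : (((c : Int) - PySem.Int.mod s 2 - 2 * 0) / 2).toNat = c / 2 := by omega
      rw [htop0, hidx]
      simp only [List.getD_cons_zero, List.length_cons]
      split_ifs with h1 h2 <;> first | rfl | (exfalso; omega)
    · have hband : (if PySem.Int.floordiv s 2 = (r : Int)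
            ∧ 0 ≤ (c : Int) - PySem.Int.mod s 2 - 2 * 0
            ∧ ((c : Int) - PySem.Int.mod s 2 - 2 * 0) % 2 = 0
            ∧ (((c : Int) - PySem.Int.mod s 2 - 2 * 0) / 2).toNat < band.length
          then some (band.getD (((c : Int) - PySem.Int.mod s 2 - 2 * 0) / 2).toNat 0)
          else none) = none := by
        rw [if_neg]
        rintro ⟨h1, h2, h3, -⟩
        exact hI (by omega)
      rw [hband, Option.or_none]
      by_cases hge : 0 ≤ 2 * (r : Int) + (c : Int) % 2 - (s + 1)
      · have hsh : (2 * (r : Int) + (c : Int) % 2 - s).toNat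
            = (2 * (r : Int) + (c : Int) % 2 - (s + 1)).toNat + 1 := by omega
        rw [hsh]
        simp only [List.getD_cons_succ, List.length_cons]
        split_ifs with h1 h2 <;> first | rfl | (exfalso; omega)
      · split_ifs with h1 h2 <;> first | rfl | (exfalso; omega)

-- every cell's coordinates are nonnegative and bounded by the dims fold
lemma cells_bounds (tr : List (List Int)) (t : Int × Int × Int) (ht : t ∈ cellsFlat tr 0) :
    0 ≤ t.1 ∧ 0 ≤ t.2.1 ∧
    t.1 ≤ ((PySem.List.enumerate tr 0).foldl dStep (-1, -1)).1 ∧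
    t.2.1 ≤ ((PySem.List.enumerate tr 0).foldl dStep (-1, -1)).2 := by
  obtain ⟨p, hp, ht2⟩ := List.mem_flatMap.mp ht
  obtain ⟨q, hq, rfl⟩ := List.mem_map.mp ht2
  obtain ⟨k, hk, rfl⟩ := (PySem.List.mem_enumerate_iff _ _ _).mp hp
  obtain ⟨j, hj, rfl⟩ := (PySem.List.mem_enumerate_iff _ _ _).mp hq
  have hj' : j < tr[k].length := hj
  have hfd := PySem.Int.floordiv_mul_add_mod ((0 : Int) + (k : Int)) 2
  have hmn := PySem.Int.mod_nonneg ((0 : Int) + (k : Int)) (by omega : (0:Int) < 2)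
  have hml := PySem.Int.mod_lt ((0 : Int) + (k : Int)) (by omega : (0:Int) < 2)
  have hmem : ((0 : Int) + (k : Int), tr[k]) ∈
      (PySem.List.enumerate tr 0).filter (fun p => !p.2.isEmpty) := by
    refine List.mem_filter.mpr ⟨hp, ?_⟩
    simp only [Bool.not_eq_eq_eq_not, Bool.not_true, List.isEmpty_eq_false_iff]
    exact List.ne_nil_of_length_pos (by omega)
  rw [dims_fold_eq]
  dsimp only [cellF]
  refine ⟨by omega, by omega, ?_, ?_⟩
  · exact (PySem.List.le_foldl_max_int _ (fun p => PySem.Int.floordiv p.1 2) _).2 _ hmem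
  · refine le_trans (b := PySem.Int.mod ((0:Int) + (k:Int)) 2 + 2 * (((tr[k].length : Int)) - 1))
      (by omega) ?_
    exact (PySem.List.le_foldl_max_int _
      (fun p => PySem.Int.mod p.1 2 + 2 * ((p.2.length : Int) - 1)) _).2 _ hmem

-- B's cell read equals the last write of A at that cell
lemma fishAt_eq (tr : List (List Int)) (r c : Nat) :
    fishAt tr (r : Int) (c : Int)
      = ((cellsFlat tr 0).foldl (wstep r c) none).getD 0 := by
  rw [cells_writes r c tr 0 (by omega)]
  have hmod : PySem.Int.mod ((c : Nat) : Int) 2 = ((c : Nat) : Int) % 2 :=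
    PySem.Int.mod_eq_emod_of_pos (by omega)
  have hiv : 2 * ((r : Nat) : Int) + PySem.Int.mod ((c : Nat) : Int) 2
      = (((2 * r + c % 2 : Nat) : Nat) : Int) := by rw [hmod]; push_cast; omega
  have hjv : PySem.Int.floordiv ((c : Nat) : Int) 2 = (((c / 2 : Nat) : Nat) : Int) := by
    rw [PySem.Int.floordiv_eq_ediv_of_pos (by omega)]; omega
  have hIto : (2 * ((r : Nat) : Int) + ((c : Nat) : Int) % 2 - 0).toNat = 2 * r + c % 2 := by
    omega
  simp only [fishAt, hiv, hjv, PySem.List.pyGetD_natCast, hIto]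
  split_ifs with h1 h2 h3 <;>
    first
      | (exfalso; omega)
      | simp [List.getD_eq_getElem?_getD]

lemma shape_fold (cs : List (Int × Int × Int)) :
    ∀ (g : List (List Int)),
    ((cs.foldl (fun g t => pySetCell g t.1 t.2.1 t.2.2) g).length = g.length) ∧
    ∀ k, (((cs.foldl (fun g t => pySetCell g t.1 t.2.1 t.2.2) g).getD k []).length
        = (g.getD k []).length) := by
  induction cs with
  | nil => intro g; exact ⟨rfl, fun _ => rfl⟩
  | cons t rest ih =>
    intro g
    have h1 := shape_set g t.1 t.2.1 t.2.2
    have h2 := ih (pySetCell g t.1 t.2.1 t.2.2)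
    simp only [List.foldl_cons]
    exact ⟨h2.1.trans h1.1, fun k => (h2.2 k).trans (h1.2 k)⟩

-- the filled zero grid, cell by cell, is B's read-out table
lemma fill_eq_table (tr : List (List Int)) (m1 m2 : Int)
    (hm : (PySem.List.enumerate tr 0).foldl dStep (-1, -1) = (m1, m2)) :
    (cellsFlat tr 0).foldl (fun g t => pySetCell g t.1 t.2.1 t.2.2)
        (List.replicate (m1 + 1).toNat (List.replicate (m2 + 1).toNat (0 : Int)))
      = (PySem.List.pyRange 0 (m1 + 1) 1).map (fun rr =>
          (PySem.List.pyRange 0 (m2 + 1) 1).map (fun cc => fishAt tr rr cc)) := by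
  have hZrow : ∀ k, k < (m1 + 1).toNat →
      (List.replicate (m1 + 1).toNat (List.replicate (m2 + 1).toNat (0 : Int))).getD k []
        = List.replicate (m2 + 1).toNat (0 : Int) := by
    intro k hkR
    simp [List.getD_eq_getElem?_getD, hkR]
  have hsh := shape_fold (cellsFlat tr 0)
      (List.replicate (m1 + 1).toNat (List.replicate (m2 + 1).toNat (0 : Int)))
  have hbnd : ∀ t ∈ cellsFlat tr 0,
      t.1.toNat < (List.replicate (m1 + 1).toNat (List.replicate (m2 + 1).toNat (0 : Int))).length
      ∧ t.2.1.toNat < ((List.replicate (m1 + 1).toNat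
            (List.replicate (m2 + 1).toNat (0 : Int))).getD t.1.toNat []).length := by
    intro t ht
    have hb := cells_bounds tr t ht
    rw [hm] at hb
    have htR : t.1.toNat < (m1 + 1).toNat := by omega
    refine ⟨by simpa using htR, ?_⟩
    rw [hZrow _ htR, List.length_replicate]
    omega
  have hGlen : ((cellsFlat tr 0).foldl (fun g t => pySetCell g t.1 t.2.1 t.2.2)
      (List.replicate (m1 + 1).toNat (List.replicate (m2 + 1).toNat (0 : Int)))).length
        = (m1 + 1).toNat := by
    rw [hsh.1, List.length_replicate]
  have hGrow : ∀ k, k < (m1 + 1).toNat →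
      (((cellsFlat tr 0).foldl (fun g t => pySetCell g t.1 t.2.1 t.2.2)
        (List.replicate (m1 + 1).toNat (List.replicate (m2 + 1).toNat (0 : Int)))).getD k []).length
        = (m2 + 1).toNat := by
    intro k hk
    rw [hsh.2 k, hZrow _ hk, List.length_replicate]
  apply List.ext_getElem
  · rw [hGlen, List.length_map, PySem.List.length_pyRange_one]
    omega
  · intro r hr1 hr2
    have hrR : r < (m1 + 1).toNat := by rw [hGlen] at hr1; exact hr1
    rw [List.getElem_map, PySem.List.getElem_pyRange_one _ _ _ (by
      rw [PySem.List.length_pyRange_one]; omega)]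
    apply List.ext_getElem
    · rw [List.length_map, PySem.List.length_pyRange_one]
      have := hGrow r hrR
      rw [List.getD_eq_getElem?_getD, List.getElem?_eq_getElem hr1, Option.getD_some] at this
      rw [this]
      omega
    · intro c hc1 hc2
      have hcC : c < (m2 + 1).toNat := by
        have := hGrow r hrR
        rw [List.getD_eq_getElem?_getD, List.getElem?_eq_getElem hr1, Option.getD_some] at this
        omega
      have hlhs : ((cellsFlat tr 0).foldl (fun g t => pySetCell g t.1 t.2.1 t.2.2)
          (List.replicate (m1 + 1).toNat (List.replicate (m2 + 1).toNat (0 : Int))))[r][c]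
            = getc ((cellsFlat tr 0).foldl (fun g t => pySetCell g t.1 t.2.1 t.2.2)
                (List.replicate (m1 + 1).toNat (List.replicate (m2 + 1).toNat (0 : Int)))) r c := by
        have hrow_eq : ((cellsFlat tr 0).foldl (fun g t => pySetCell g t.1 t.2.1 t.2.2)
            (List.replicate (m1 + 1).toNat (List.replicate (m2 + 1).toNat (0 : Int)))).getD r []
              = ((cellsFlat tr 0).foldl (fun g t => pySetCell g t.1 t.2.1 t.2.2)
            (List.replicate (m1 + 1).toNat (List.replicate (m2 + 1).toNat (0 : Int))))[r] := by
          rw [List.getD_eq_getElem?_getD, List.getElem?_eq_getElem hr1]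
          rfl
        unfold getc
        rw [hrow_eq, List.getD_eq_getElem?_getD, List.getElem?_eq_getElem hc1]
        rfl
      rw [hlhs, fold_writes r c (cellsFlat tr 0) _
            (by simpa using hrR)
            (by rw [hZrow _ hrR, List.length_replicate]; exact hcC)
            hbnd]
      have hz0 : getc (List.replicate (m1 + 1).toNat
          (List.replicate (m2 + 1).toNat (0 : Int))) r c = 0 := by
        unfold getc
        rw [hZrow _ hrR]
        cases Nat.lt_or_ge c (m2 + 1).toNat with
        | inl h => simp [List.getD_eq_getElem?_getD, h]
        | inr h => simp [List.getD_eq_getElem?_getD, Nat.not_lt.mpr h]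
      rw [hz0, ← fishAt_eq tr r c, List.getElem_map,
        PySem.List.getElem_pyRange_one _ _ _ (by
          rw [PySem.List.length_pyRange_one]; omega)]
      simp

-- ===== VERDICT (by name: the statement is the Claim_ definition above) =====
theorem board_from_teacher_spec : Claim_equal_board_from_teacher := by
  intro tr _
  unfold Spec_board_from_teacher board_from_teacher board_from_teacher_alt
  rw [outer_fold_eq]
  have hge := dStep_fold_ge (PySem.List.enumerate tr 0) (-1, -1)
  set m := (PySem.List.enumerate tr 0).foldl dStep (-1, -1) with hm
  have h1 : (if m.1 ≥ 0 then m.1 + 1 else 0) = m.1 + 1 := by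
    rcases hge with ⟨h, -⟩; split <;> omega
  have h2 : (if m.2 ≥ 0 then m.2 + 1 else 0) = m.2 + 1 := by
    rcases hge with ⟨-, h⟩; split <;> omega
  have hval : ∀ p ∈ (PySem.List.enumerate tr 0).filter (fun p => !p.2.isEmpty), 0 ≤ p.1 := by
    intro p hp
    obtain ⟨k, -, rfl⟩ := (PySem.List.mem_enumerate_iff _ _ _).mp (List.mem_filter.mp hp).1
    omega
  have hmax1 : PySem.List.maxD
      (((PySem.List.enumerate tr 0).filter (fun p => !p.2.isEmpty)).map
        (fun p => PySem.Int.floordiv p.1 2)) (fun x => x) (-1) = m.1 := by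
    rw [maxD_id_eq_foldl _ _ (by
        intro x hx
        obtain ⟨p, hp, rfl⟩ := List.mem_map.mp hx
        have := hval p hp
        rw [PySem.Int.floordiv_eq_ediv_of_pos (by omega)]
        omega),
      List.foldl_map, hm, dims_fold_eq]
  have hmax2 : PySem.List.maxD
      (((PySem.List.enumerate tr 0).filter (fun p => !p.2.isEmpty)).map
        (fun p => PySem.Int.mod p.1 2 + 2 * ((p.2.length : Int) - 1))) (fun x => x) (-1)
      = m.2 := by
    rw [maxD_id_eq_foldl _ _ (by
        intro x hx
        obtain ⟨p, hp, rfl⟩ := List.mem_map.mp hx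
        have h0 := PySem.Int.mod_nonneg p.1 (by omega : (0:Int) < 2)
        have hne : p.2 ≠ [] := by
          have := (List.mem_filter.mp hp).2
          simpa [List.isEmpty_eq_false_iff] using this
        have hlen : 1 ≤ (p.2.length : Int) := by
          have := List.length_pos_iff.mpr hne
          omega
        omega),
      List.foldl_map, hm, dims_fold_eq]
  simp only [h1, h2, hmax1, hmax2, List.nil_append]
  exact fill_eq_table tr m.1 m.2 (by rw [← hm])
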